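-- pv_equiv track=rewrite | github.com/Vol-K/volodymyr_k_gh21 | HT_05/3.py | login_validation
-- ===== SOURCE A (Python) =====
-- def login_validation(user_name, user_pass):
--
--     # Calculation digits inside password
--     password_digit_counter = 0
--     for item in user_pass:
--         if item.isdigit():
--             password_digit_counter += 1
--
--     # Calculation CAPITAL letters inside password
--     upper_letter_counter = 0
--     for letter in user_pass:
--         if letter.isupper():
--             upper_letter_counter += 1
--
--     if len(user_name) < 3:
--         func_result = "Length of user-name must be bigger than 3 symbols"
--     elif len(user_name) > 15:
--         func_result = "Length of user-name must be less than 15 symbols"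
--     elif len(user_pass) < 8:
--         func_result = "Length of user-password must be bigger than 7 symbols"
--     elif password_digit_counter < 1:
--         func_result = "User-password must contain min 1 digit"
--     elif upper_letter_counter < 1:
--         func_result = "User-password must contain min CAPITAL letter"
--     else:
--         func_result = "OK"
--
--     return func_result
-- ===== SOURCE B (Python) =====
-- def login_validation(user_name, user_pass):
--     # One pass over the password computing both flags, with early exit once both found.
--     has_digit = False
--     has_upper = False
--     for c in user_pass:
--         has_digit = has_digit or c.isdigit()
--         has_upper = has_upper or c.isupper()
--         if has_digit and has_upper:
--             break
--     # Build the result back-to-front: start from "OK" and overwrite with each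
--     # message in reverse priority order, so the highest-priority failure
--     # (A's first if/elif branch) is written last and wins.
--     result = "OK"
--     if not has_upper:
--         result = "User-password must contain min CAPITAL letter"
--     if not has_digit:
--         result = "User-password must contain min 1 digit"
--     if len(user_pass) < 8:
--         result = "Length of user-password must be bigger than 7 symbols"
--     if len(user_name) > 15:
--         result = "Length of user-name must be less than 15 symbols"
--     if len(user_name) < 3:
--         result = "Length of user-name must be bigger than 3 symbols"
--     return result
-- ===== Notes on version B (the rewrite author's own statement) =====
-- stated objective: alternative
-- what changed: Replaces A's two full counting passes and first-match if/elif ladder by one early-exiting pass computing both boolean flags and a back-to-front overwrite chain in reverse priority order (last write wins).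
import Mathlib
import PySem

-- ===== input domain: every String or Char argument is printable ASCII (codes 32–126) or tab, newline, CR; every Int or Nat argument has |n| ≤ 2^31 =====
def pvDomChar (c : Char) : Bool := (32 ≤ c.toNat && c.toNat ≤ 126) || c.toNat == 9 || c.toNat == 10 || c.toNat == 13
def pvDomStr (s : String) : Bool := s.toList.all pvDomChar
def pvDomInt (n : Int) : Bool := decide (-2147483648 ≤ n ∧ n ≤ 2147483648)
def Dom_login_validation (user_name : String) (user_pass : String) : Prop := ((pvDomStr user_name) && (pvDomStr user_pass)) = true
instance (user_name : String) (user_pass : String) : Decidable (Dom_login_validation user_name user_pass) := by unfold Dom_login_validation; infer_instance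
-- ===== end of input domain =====

-- B replaces A's two full counting passes and first-match if/elif ladder by one early-exiting
-- boolean-flag pass and a back-to-front overwrite chain (objective: alternative); same return value.

-- ===== PORT A =====
def login_validation (user_name : String) (user_pass : String) : String :=
  -- Calculation digits inside password
  let password_digit_counter : Int :=
    user_pass.toList.foldl (fun c item => if PySem.Chars.isdigit item then c + 1 else c) 0
  -- Calculation CAPITAL letters inside password
  let upper_letter_counter : Int :=
    user_pass.toList.foldl (fun c letter => if PySem.Chars.isupper letter then c + 1 else c) 0
  if PySem.Str.len user_name < 3 then
    "Length of user-name must be bigger than 3 symbols"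
  else if PySem.Str.len user_name > 15 then
    "Length of user-name must be less than 15 symbols"
  else if PySem.Str.len user_pass < 8 then
    "Length of user-password must be bigger than 7 symbols"
  else if password_digit_counter < 1 then
    "User-password must contain min 1 digit"
  else if upper_letter_counter < 1 then
    "User-password must contain min CAPITAL letter"
  else
    "OK"

-- ===== PORT B =====
-- one pass over the password: both flags, early exit once both are set (B's for-loop with break)
def scanFlags : List Char → Bool → Bool → Bool × Bool
  | [], has_digit, has_upper => (has_digit, has_upper)
  | c :: rest, has_digit, has_upper =>
    let hd := has_digit || PySem.Chars.isdigit c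
    let hu := has_upper || PySem.Chars.isupper c
    if hd && hu then (hd, hu) else scanFlags rest hd hu

def login_validation_alt (user_name : String) (user_pass : String) : String :=
  let flags := scanFlags user_pass.toList false false
  -- back-to-front: overwrite in reverse priority order, last write wins
  let result := "OK"
  let result := if !flags.2 then "User-password must contain min CAPITAL letter" else result
  let result := if !flags.1 then "User-password must contain min 1 digit" else result
  let result := if PySem.Str.len user_pass < 8 then "Length of user-password must be bigger than 7 symbols" else result
  let result := if PySem.Str.len user_name > 15 then "Length of user-name must be less than 15 symbols" else result
  let result := if PySem.Str.len user_name < 3 then "Length of user-name must be bigger than 3 symbols" else result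
  result

-- ===== PRECONDITION & SPEC =====
def Spec_login_validation (user_name : String) (user_pass : String) (out : String) : Prop := out = login_validation_alt user_name user_pass
instance (user_name : String) (user_pass : String) (out : String) : Decidable (Spec_login_validation user_name user_pass out) := by unfold Spec_login_validation; infer_instance

-- ===== CLAIM =====
def Claim_equal_login_validation : Prop := ∀ (user_name : String) (user_pass : String), Dom_login_validation user_name user_pass → Spec_login_validation user_name user_pass (login_validation user_name user_pass)

-- ===== LEMMAS AND PROOFS =====

-- the early-exiting flag scan computes exactly the two `any`s
theorem scanFlags_eq (l : List Char) (hd hu : Bool) :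
    scanFlags l hd hu = (hd || l.any PySem.Chars.isdigit, hu || l.any PySem.Chars.isupper) := by
  induction l generalizing hd hu with
  | nil => simp [scanFlags]
  | cons c rest ih =>
    simp only [scanFlags, List.any_cons]
    by_cases h : (hd || PySem.Chars.isdigit c) && (hu || PySem.Chars.isupper c)
    · rw [if_pos h]
      rcases Bool.and_eq_true_iff.mp h with ⟨h1, h2⟩
      rcases Bool.or_eq_true_iff.mp h1 with h1' | h1' <;>
        rcases Bool.or_eq_true_iff.mp h2 with h2' | h2' <;> simp [h1', h2']
    · rw [if_neg h, ih]
      simp [Bool.or_assoc]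

-- A's counting loop computes the count of elements satisfying p
theorem foldl_count_eq (p : Char → Bool) (l : List Char) (n : Int) :
    l.foldl (fun c x => if p x then c + 1 else c) n = n + (l.countP p : Int) := by
  induction l generalizing n with
  | nil => simp
  | cons x xs ih =>
    simp only [List.foldl_cons, List.countP_cons, ih]
    by_cases h : p x <;> simp [h] <;> ring

theorem count_lt_one_iff (p : Char → Bool) (l : List Char) :
    ((0 : Int) + (l.countP p : Int) < 1) ↔ l.any p = false := by
  rw [List.any_eq_false]
  constructor
  · intro h x hx hpx
    have : 0 < l.countP p := List.countP_pos_iff.mpr ⟨x, hx, hpx⟩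
    omega
  · intro h
    have : l.countP p = 0 := List.countP_eq_zero.mpr (by intro a ha hp; exact h a ha hp)
    omega

-- ===== VERDICT =====
theorem login_validation_spec : Claim_equal_login_validation := by
  intro user_name user_pass _
  unfold Spec_login_validation login_validation login_validation_alt
  have hd := count_lt_one_iff PySem.Chars.isdigit user_pass.toList
  have hu := count_lt_one_iff PySem.Chars.isupper user_pass.toList
  simp only [scanFlags_eq, foldl_count_eq, Bool.false_or, hd, hu, Bool.not_eq_true']
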